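-- pv_equiv track=rewrite | github.com/philornot/InformatykaTrzeciaKlasa | matura2021czerwiec/Zadanie1/Franek/1-2.py | rk
-- ===== SOURCE A (Python) =====
-- def rk(n):
--     dl = 0
--     i = n//4
--     while n > 0:
--         if n - (i * i) >= 0:
--             dl += 1
--             n = n - (i * i)
--         if n - (i*i) < 0:
--             i -= 1
--     return dl
-- ===== SOURCE B (Python) =====
-- def rk(n):
--     dl = 0
--     cap = n // 4
--     i = 0
--     while i < cap and (i + 1) * (i + 1) <= n:
--         i += 1
--     while i > 0:
--         q = i * i
--         dl += n // q
--         n %= q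
--         i -= 1
--     return dl
-- ===== Notes on version B (the rewrite author's own statement) =====
-- stated objective: faster
-- what changed: B finds the starting base by climbing to min(n//4, isqrt(n)) and then uses one divmod per square level instead of A's one-by-one subtraction and one-by-one decrement of i from n//4; Pre_ excludes n in {1,2,3}, where A's loop keeps i=0 and subtracts 0 forever (divergence).
-- outside the precondition, e.g. on rk(1): A does not finish within the time limit, B returns 0; on rk(2): A does not finish within the time limit, B returns 0; on rk(3): A does not finish within the time limit, B returns 0
import Mathlib
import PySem

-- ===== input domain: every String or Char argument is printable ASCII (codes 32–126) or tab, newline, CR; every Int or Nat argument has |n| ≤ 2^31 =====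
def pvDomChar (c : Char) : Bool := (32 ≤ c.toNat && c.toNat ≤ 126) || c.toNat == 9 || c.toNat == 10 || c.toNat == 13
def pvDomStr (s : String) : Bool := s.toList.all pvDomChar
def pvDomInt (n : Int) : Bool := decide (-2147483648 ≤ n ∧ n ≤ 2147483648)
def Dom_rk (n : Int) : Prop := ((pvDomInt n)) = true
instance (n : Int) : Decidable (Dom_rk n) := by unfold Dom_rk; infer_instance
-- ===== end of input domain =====

-- B replaces A's one-by-one subtraction/decrement scan from n//4 by a climb to
-- min(n//4, isqrt n) followed by one divmod per square level (objective: faster).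

-- ===== PORT A =====
-- A's while loop, one constructor of fuel per Python iteration; on Pre_rk the
-- fuel 2*n+1 is proved sufficient (the loop runs at most n + n//4 iterations).
def rkLoop : Nat → Int → Int → Int → Int
  | 0, _, _, dl => dl
  | fuel+1, n, i, dl =>
    if n > 0 then
      let n' := if n - i * i ≥ 0 then n - i * i else n
      let dl' := if n - i * i ≥ 0 then dl + 1 else dl
      let i' := if n' - i * i < 0 then i - 1 else i
      rkLoop fuel n' i' dl'
    else dl

def rk (n : Int) : Int := rkLoop ((2 * n).toNat + 1) n (PySem.Int.floordiv n 4) 0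

-- ===== PORT B =====
-- first while loop of B: climb i while i < cap and (i+1)^2 <= n
def rkClimb (cap n i : Int) : Int :=
  if i < cap ∧ (i + 1) * (i + 1) ≤ n then rkClimb cap n (i + 1) else i
termination_by (cap - i).toNat
decreasing_by omega

-- second while loop of B: per level i add n // i^2, keep n % i^2, decrement i
def rkDown (i n dl : Int) : Int :=
  if h : 0 < i then
    rkDown (i - 1) (PySem.Int.mod n (i * i)) (dl + PySem.Int.floordiv n (i * i))
  else dl
termination_by i.toNat
decreasing_by omega

def rk_alt (n : Int) : Int :=
  rkDown (rkClimb (PySem.Int.floordiv n 4) n 0) n 0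

-- ===== PRECONDITION & SPEC =====
-- Pre_ excludes n = 1, 2, 3: there A's loop has i = 0 and subtracts 0 forever,
-- so the Python A never returns (divergence, not a value to match).
def Pre_rk (n : Int) : Prop := n ≤ 0 ∨ 4 ≤ n
instance (n : Int) : Decidable (Pre_rk n) := by unfold Pre_rk; infer_instance
def pvWitness_rk : Int := 13

def Spec_rk (n : Int) (out : Int) : Prop := out = rk_alt n
instance (n : Int) (out : Int) : Decidable (Spec_rk n out) := by unfold Spec_rk; infer_instance

-- ===== CLAIM (what is proved, stated in full; the proofs are below) =====
def Claim_equal_rk : Prop := ∀ (n : Int), Dom_rk n → Pre_rk n → Spec_rk n (rk n)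

-- ===== LEMMAS AND PROOFS =====

lemma rkDown_zero (i dl : Int) : rkDown i 0 dl = dl := by
  unfold rkDown
  split
  · rename_i h
    have hq : (0:Int) < i * i := by positivity
    have h1 : PySem.Int.mod 0 (i * i) = 0 := by
      rw [PySem.Int.mod_eq_emod_of_pos hq]; simp
    have h2 : PySem.Int.floordiv 0 (i * i) = 0 := by
      rw [PySem.Int.floordiv_eq_ediv_of_pos hq]; simp
    rw [h1, h2, add_zero]
    exact rkDown_zero (i - 1) dl
  · rfl
termination_by i.toNat
decreasing_by rename_i h; omega

-- skip a level whose square exceeds n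
lemma rkDown_skip (i n dl : Int) (hn : 0 ≤ n) (hi : 0 < i) (hlt : n < i * i) :
    rkDown i n dl = rkDown (i - 1) n dl := by
  have hq : (0:Int) < i * i := by positivity
  have hmod : PySem.Int.mod n (i * i) = n := by
    rw [PySem.Int.mod_eq_emod_of_pos hq]
    exact Int.emod_eq_of_lt hn hlt
  have hdiv : PySem.Int.floordiv n (i * i) = 0 := by
    rw [PySem.Int.floordiv_eq_ediv_of_pos hq]
    exact Int.ediv_eq_zero_of_lt hn hlt
  conv_lhs => rw [rkDown]
  rw [dif_pos hi, hmod, hdiv, add_zero]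

-- all levels from i+k down to i+1 have squares > n, so they contribute nothing
lemma rkDown_skip_many (k : Nat) (i n dl : Int) (hn : 0 ≤ n) (hi : 0 ≤ i)
    (hlt : n < (i + 1) * (i + 1)) :
    rkDown (i + k) n dl = rkDown i n dl := by
  induction k with
  | zero => simp
  | succ k ih =>
    have hik : n < (i + (k + 1)) * (i + (k + 1)) := by nlinarith
    have hstep := rkDown_skip (i + (k + 1 : Nat)) n dl hn (by push_cast; omega)
      (by push_cast; push_cast at hik; exact hik)
    push_cast at hstep ⊢
    rw [show i + ((k : Int) + 1) - 1 = i + k by ring] at hstep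
    rw [hstep]
    exact ih

-- climb result: between i and cap, and either = cap or next square exceeds n
lemma rkClimb_spec (cap n i : Int) (h : i ≤ cap) :
    i ≤ rkClimb cap n i ∧ rkClimb cap n i ≤ cap ∧
      (rkClimb cap n i = cap ∨ n < (rkClimb cap n i + 1) * (rkClimb cap n i + 1)) := by
  unfold rkClimb
  split
  · rename_i hg
    have := rkClimb_spec cap n (i + 1) (by omega)
    exact ⟨by omega, this.2.1, this.2.2⟩
  · rename_i hg
    rcases lt_or_ge i cap with h1 | h1
    · have : ¬ (i + 1) * (i + 1) ≤ n := fun hc => hg ⟨h1, hc⟩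
      exact ⟨le_refl i, h, Or.inr (by omega)⟩
    · exact ⟨le_refl i, h, Or.inl (by omega)⟩
termination_by (cap - i).toNat
decreasing_by omega

-- A's loop, given enough fuel, computes B's per-level divmod loop
lemma rkLoop_eq_rkDown (fuel : Nat) :
    ∀ n i dl : Int, 0 ≤ n → (n = 0 ∨ 1 ≤ i) → n.toNat + i.toNat ≤ fuel →
      rkLoop fuel n i dl = rkDown i n dl := by
  induction fuel with
  | zero =>
    intro n i dl hn hinv hf
    have : n = 0 := by omega
    subst this
    simp [rkLoop, rkDown_zero]
  | succ fuel ih =>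
    intro n i dl hn hinv hf
    rcases eq_or_lt_of_le hn with h0 | hpos
    · rw [← h0]
      simp [rkLoop, rkDown_zero]
    · have hi : 1 ≤ i := by omega
      have hq : (0:Int) < i * i := by positivity
      rw [rkLoop, if_pos hpos]
      by_cases h1 : n - i * i ≥ 0
      · -- subtract one square
        simp only [h1, if_pos]
        by_cases h2 : n - i * i - i * i < 0
        · -- last subtraction at this level: i decrements
          simp only [h2, if_pos]
          have huniq := (Int.ediv_emod_unique (a := n) (b := i * i) (r := n - i * i)
            (q := 1) hq).mpr ⟨by ring, by omega, by omega⟩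
          have hdiv : PySem.Int.floordiv n (i * i) = 1 := by
            rw [PySem.Int.floordiv_eq_ediv_of_pos hq]; exact huniq.1
          have hmod : PySem.Int.mod n (i * i) = n - i * i := by
            rw [PySem.Int.mod_eq_emod_of_pos hq]; exact huniq.2
          have hinv' : n - i * i = 0 ∨ 1 ≤ i - 1 := by
            rcases lt_or_ge i 2 with hc | hc
            · left
              have : i = 1 := by omega
              subst this
              omega
            · right; omega
          rw [ih (n - i * i) (i - 1) (dl + 1) (by omega) hinv' (by omega)]
          conv_rhs => rw [rkDown]
          rw [dif_pos (show (0:Int) < i by omega), hdiv, hmod]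
        · -- same level continues
          simp only [h2, if_neg, if_false]
          rw [ih (n - i * i) i (dl + 1) (by omega) (Or.inr hi) (by omega)]
          have hmod : PySem.Int.mod (n - i * i) (i * i) = PySem.Int.mod n (i * i) := by
            rw [PySem.Int.mod_eq_emod_of_pos hq, PySem.Int.mod_eq_emod_of_pos hq]
            exact Int.sub_emod_right n (i * i)
          have hdiv : PySem.Int.floordiv (n - i * i) (i * i)
              = PySem.Int.floordiv n (i * i) - 1 := by
            rw [PySem.Int.floordiv_eq_ediv_of_pos hq, PySem.Int.floordiv_eq_ediv_of_pos hq]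
            rw [show n - i * i = n + (-1) * (i * i) by ring,
              Int.add_mul_ediv_right _ _ (by omega)]
            ring
          conv_lhs => rw [rkDown]
          conv_rhs => rw [rkDown]
          rw [dif_pos (show (0:Int) < i by omega), dif_pos (show (0:Int) < i by omega),
            hmod, hdiv]
          ring_nf
      · -- no subtraction: i decrements
        simp only [h1, if_neg, if_false]
        have hlt : n < i * i := by omega
        have hi2 : 2 ≤ i := by nlinarith
        rw [if_pos (show n - i * i < 0 by omega)]
        rw [ih n (i - 1) dl hn (Or.inr (by omega)) (by omega)]
        exact (rkDown_skip i n dl hn (by omega) hlt).symm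

-- ===== VERDICT (by name: the statement is the Claim_ definition above) =====
theorem rk_spec : Claim_equal_rk := by
  unfold Claim_equal_rk
  intro n _ hpre
  unfold Spec_rk rk rk_alt
  have hfd : PySem.Int.floordiv n 4 = n / 4 :=
    PySem.Int.floordiv_eq_ediv_of_pos (by omega)
  rw [hfd]
  rcases hpre with hle | hge
  · -- n ≤ 0: A's loop exits at once; B's climb stays at 0 and down-loop is empty
    rw [rkLoop, if_neg (by omega)]
    have hclimb : rkClimb (n / 4) n 0 = 0 := by
      rw [rkClimb, if_neg (by rintro ⟨hc, -⟩; omega)]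
    rw [hclimb, rkDown, dif_neg (by omega)]
  · -- 4 ≤ n
    have hcap1 : 1 ≤ n / 4 := by omega
    have hcapn : n / 4 ≤ n := by omega
    rw [rkLoop_eq_rkDown _ n (n / 4) 0 (by omega) (Or.inr hcap1) (by omega)]
    obtain ⟨hs0, hscap, hsor⟩ := rkClimb_spec (n / 4) n 0 (by omega)
    set s := rkClimb (n / 4) n 0 with hsdef
    rcases hsor with hcase | hcase
    · rw [hcase]
    · rw [show n / 4 = s + (((n / 4 - s).toNat : Int)) by omega]
      exact rkDown_skip_many (n / 4 - s).toNat s n 0 (by omega) hs0 hcase
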